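-- pv_equiv track=rewrite | github.com/Arsen1302/Code-copy-detector | TestData/solutions/problem_1401_4_1.py | solution_1401_4_1
-- ===== SOURCE A (Python) =====
-- from typing import List
--
-- def solution_1401_4_1(parents: List[int]) -> int:
--
--     def solution_1401_4_2(n):
--         k=1
--         for i in child[n]:
--             k += solution_1401_4_2(i)
--         nums[n]=k
--         return k
--
--     child = {}
--     for i in range(len(parents)):
--         child[i]=[]
--     for i in range(1,len(parents)):
--         child[parents[i]].append(i)
--
--     nums={}
--     solution_1401_4_2(0)
--     k=1
--     for i in child[0]:
--         k*=nums[i]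
--     score=[k]
--     for i in range(1,len(nums)):
--         k=1
--         k*=(nums[0]-nums[i])
--         for j in child[i]:
--             k*=nums[j]
--         score.append(k)
--
--     return score.count(max(score))
-- ===== SOURCE B (Python) =====
-- from typing import List
--
-- def solution_1401_4_1(parents: List[int]) -> int:
--     n = len(parents)
--     # depth of each node = number of steps up to the root 0
--     depth = [0] * n
--     for j in range(1, n):
--         v = j
--         d = 0
--         while v != 0:
--             v = parents[v]
--             d += 1
--         depth[j] = d
--     # process nodes deepest-first, so each node's size is final before its parent's
--     order = sorted(range(1, n), key=lambda j: -depth[j])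
--     sizes = [1] * n
--     for j in order:
--         sizes[parents[j]] += sizes[j]
--     prods = [1] * n
--     for j in range(1, n):
--         prods[parents[j]] *= sizes[j]
--     score = [prods[0]]
--     for i in range(1, n):
--         score.append((sizes[0] - sizes[i]) * prods[i])
--     return score.count(max(score))
-- ===== Notes on version B (the rewrite author's own statement) =====
-- stated objective: alternative
-- what changed: B replaces A's child-adjacency dict and recursive post-order size computation by per-node depth walks plus one deepest-first sweep that accumulates subtree sizes and child products directly into arrays, then builds the same score list.
-- outside the precondition, e.g. on solution_1401_4_1([0, 1]): A returns 1, B does not finish within the time limit; on solution_1401_4_1([5, 0, 2, 2]): A returns 2, B does not finish within the time limit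
import Mathlib
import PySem

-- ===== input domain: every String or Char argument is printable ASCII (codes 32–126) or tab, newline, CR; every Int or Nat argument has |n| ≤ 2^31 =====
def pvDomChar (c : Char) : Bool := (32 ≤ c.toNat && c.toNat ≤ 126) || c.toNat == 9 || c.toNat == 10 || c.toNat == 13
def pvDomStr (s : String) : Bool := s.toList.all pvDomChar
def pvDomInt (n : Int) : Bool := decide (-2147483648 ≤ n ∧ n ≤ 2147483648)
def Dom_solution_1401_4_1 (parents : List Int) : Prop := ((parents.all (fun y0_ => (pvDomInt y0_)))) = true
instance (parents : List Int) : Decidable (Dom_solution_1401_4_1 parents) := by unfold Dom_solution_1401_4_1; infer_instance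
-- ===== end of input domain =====

-- B computes subtree sizes with per-node upward depth walks and a deepest-first array sweep
-- instead of A's recursion over a child-adjacency dict; the return value is proved identical
-- on parent arrays that form a tree rooted at node 0.

-- ===== PORT A =====
-- child = {i: [] for i in range(n)}; for i in 1..n-1: child[parents[i]].append(i)
def childDictA (ps : List Int) : PySem.Dict Int (List Int) :=
  let c := (PySem.List.pyRange 0 (ps.length : Int) 1).foldl
    (fun d i => d.insert i ([] : List Int)) PySem.Dict.empty
  (PySem.List.pyRange 1 (ps.length : Int) 1).foldl
    (fun d i => d.modify (PySem.List.pyGetD ps i 0) [] (fun l => l ++ [i])) c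

-- the inner recursive helper solution_1401_4_2 (fuel = n is enough on every admitted input)
def dfsA (child : PySem.Dict Int (List Int)) :
    Nat → Int → PySem.Dict Int Int → Int × PySem.Dict Int Int
  | 0, _, nums => (1, nums)
  | f+1, v, nums =>
      let r := (child.getD v []).foldl
        (fun (acc : Int × PySem.Dict Int Int) i =>
          let s := dfsA child f i acc.2
          (acc.1 + s.1, s.2)) (1, nums)
      (r.1, r.2.insert v r.1)

-- nums after the recursive call solution_1401_4_2(0)
def numsA (ps : List Int) : PySem.Dict Int Int :=
  (dfsA (childDictA ps) ps.length 0 PySem.Dict.empty).2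

-- the score list A builds
def scoreA (ps : List Int) : List Int :=
  (PySem.List.pyRange 1 ((numsA ps).size : Int) 1).foldl
    (fun sc i =>
      sc ++ [((childDictA ps).getD i []).foldl (fun k j => k * (numsA ps).getD j 0)
               (1 * ((numsA ps).getD 0 0 - (numsA ps).getD i 0))])
    [((childDictA ps).getD 0 []).foldl (fun k i => k * (numsA ps).getD i 0) 1]

def solution_1401_4_1 (parents : List Int) : Int :=
  match PySem.List.max? (scoreA parents) (fun x => x) with
  | some m => (PySem.List.count (scoreA parents) m : Int)
  | none => 0

-- ===== PORT B =====
-- Python list-index assignment xs[i] = v (negative i wraps; out of range is a no-op here,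
-- where Python raises IndexError — those inputs lie outside Pre_)
def pySet (xs : List Int) (i v : Int) : List Int :=
  if 0 ≤ i then xs.set i.toNat v else xs.set ((xs.length : Int) + i).toNat v

-- the while-loop 'v, d = j, 0; while v != 0: v = parents[v]; d += 1' (fuel = n is enough)
def walkDepth (ps : List Int) : Nat → Int → Int → Int
  | 0, _, d => d
  | f+1, v, d => if v = 0 then d else walkDepth ps f (PySem.List.pyGetD ps v 0) (d + 1)

def depthsB (ps : List Int) : List Int :=
  (PySem.List.pyRange 1 (ps.length : Int) 1).foldl
    (fun ds j => ds.set j.toNat (walkDepth ps ps.length j 0)) (List.replicate ps.length 0)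

-- order = sorted(range(1, n), key=lambda j: -depth[j])
def orderB (ps : List Int) : List Int :=
  PySem.List.sorted (PySem.List.pyRange 1 (ps.length : Int) 1)
    (fun j => -(PySem.List.pyGetD (depthsB ps) j 0))

-- sizes = [1]*n; for j in order: sizes[parents[j]] += sizes[j]
def sizesB (ps : List Int) : List Int :=
  (orderB ps).foldl
    (fun sz j =>
      pySet sz (PySem.List.pyGetD ps j 0)
        (PySem.List.pyGetD sz (PySem.List.pyGetD ps j 0) 0 + PySem.List.pyGetD sz j 0))
    (List.replicate ps.length 1)

-- prods = [1]*n; for j in range(1, n): prods[parents[j]] *= sizes[j]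
def prodsB (ps : List Int) : List Int :=
  (PySem.List.pyRange 1 (ps.length : Int) 1).foldl
    (fun pr j =>
      pySet pr (PySem.List.pyGetD ps j 0)
        (PySem.List.pyGetD pr (PySem.List.pyGetD ps j 0) 0 *
         PySem.List.pyGetD (sizesB ps) j 0))
    (List.replicate ps.length 1)

-- score = [prods[0]] + [(sizes[0]-sizes[i])*prods[i] for i in 1..n-1]
def scoreB (ps : List Int) : List Int :=
  (PySem.List.pyRange 1 (ps.length : Int) 1).foldl
    (fun sc i =>
      sc ++ [(PySem.List.pyGetD (sizesB ps) 0 0 - PySem.List.pyGetD (sizesB ps) i 0) *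
              PySem.List.pyGetD (prodsB ps) i 0])
    [PySem.List.pyGetD (prodsB ps) 0 0]

def solution_1401_4_1_alt (parents : List Int) : Int :=
  match PySem.List.max? (scoreB parents) (fun x => x) with
  | some m => (PySem.List.count (scoreB parents) m : Int)
  | none => 0

-- ===== PRECONDITION & SPEC =====
-- the chain of strict ancestors of v: parents[v], parents[parents[v]], … (stops at 0 or when fuel runs out)
def chainF (ps : List Int) : Nat → Int → List Int
  | 0, _ => []
  | f+1, v =>
      if v = 0 then [] else
        PySem.List.pyGetD ps v 0 :: chainF ps f (PySem.List.pyGetD ps v 0)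

-- Pre_ admits exactly the parent arrays that describe a tree rooted at node 0 (every node's
-- parent index is in range and its ancestor chain reaches 0).  On other inputs A raises
-- KeyError / recurses forever, or — when some nodes are unreachable from node 0 — silently
-- scores only the reachable part, while B's upward walks do not terminate there.
def Pre_solution_1401_4_1 (parents : List Int) : Prop :=
  0 < parents.length ∧
    ∀ i ∈ PySem.List.pyRange 1 (parents.length : Int) 1,
      0 ≤ PySem.List.pyGetD parents i 0 ∧
      PySem.List.pyGetD parents i 0 < (parents.length : Int) ∧
      (0 : Int) ∈ chainF parents parents.length i

instance (parents : List Int) : Decidable (Pre_solution_1401_4_1 parents) := by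
  unfold Pre_solution_1401_4_1; infer_instance

def pvWitness_solution_1401_4_1 : List Int := [0, 0, 1, 1, 0]

def Spec_solution_1401_4_1 (parents : List Int) (out : Int) : Prop :=
  out = solution_1401_4_1_alt parents
instance (parents : List Int) (out : Int) : Decidable (Spec_solution_1401_4_1 parents out) := by
  unfold Spec_solution_1401_4_1; infer_instance

-- ===== CLAIM (what is proved, stated in full; the proofs are below) =====
def Claim_equal_solution_1401_4_1 : Prop :=
  ∀ (parents : List Int), Dom_solution_1401_4_1 parents →
    Pre_solution_1401_4_1 parents →
    Spec_solution_1401_4_1 parents (solution_1401_4_1 parents)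

-- ===== LEMMAS AND PROOFS =====

-- children of v: indices 1 ≤ i < n with parents[i] = v, in increasing order
def childL (ps : List Int) (v : Int) : List Int :=
  (PySem.List.pyRange 1 (ps.length : Int) 1).filter
    (fun i => PySem.List.pyGetD ps i 0 == v)

-- subtree size with fuel, the common specification of both programs
def szF (ps : List Int) : Nat → Int → Int
  | 0, _ => 1
  | f+1, v => 1 + ((childL ps v).map (szF ps f)).sum

def dep (ps : List Int) (v : Int) : Nat := (chainF ps ps.length v).length
def SZ (ps : List Int) (v : Int) : Int := szF ps ps.length v

-- the (node, value) pairs inserted into nums by dfsA, in insertion order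
def postPairs (ps : List Int) : Nat → Int → List (Int × Int)
  | 0, _ => []
  | f+1, v => (childL ps v).flatMap (postPairs ps f) ++ [(v, szF ps (f+1) v)]

theorem chainF_zero (ps : List Int) (f : Nat) : chainF ps f 0 = [] := by
  cases f <;> simp [chainF]

theorem chainF_succ (ps : List Int) (f : Nat) {v : Int} (hv : v ≠ 0) :
    chainF ps (f+1) v = PySem.List.pyGetD ps v 0 :: chainF ps f (PySem.List.pyGetD ps v 0) := by
  conv_lhs => rw [chainF]
  simp [hv]

theorem chainF_stable (ps : List Int) :
    ∀ (f : Nat) (v : Int), (0 : Int) ∈ chainF ps f v → chainF ps (f+1) v = chainF ps f v := by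
  intro f
  induction f with
  | zero => intro v h; simp [chainF] at h
  | succ f ih =>
    intro v h
    by_cases hv : v = 0
    · simp [hv, chainF_zero]
    · rw [chainF_succ ps f hv] at h
      rw [chainF_succ ps (f+1) hv, chainF_succ ps f hv, List.mem_cons] at *
      rcases h with h | h
      · rw [← h]; simp [chainF_zero]
      · rw [ih _ h]

theorem chainF_stable_le (ps : List Int) (f g : Nat) (v : Int)
    (h : (0 : Int) ∈ chainF ps f v) (hfg : f ≤ g) : chainF ps g v = chainF ps f v := by
  induction g with
  | zero => interval_cases f; rfl
  | succ g ih =>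
    rcases Nat.lt_or_ge f (g+1) with hlt | hge
    · have hfg' : f ≤ g := by omega
      rw [chainF_stable ps g v (by rw [ih hfg']; exact h), ih hfg']
    · have : f = g + 1 := by omega
      rw [this]

theorem nodup_subset_length {l m : List Int} (h : l.Nodup) (hs : l ⊆ m) :
    l.length ≤ m.length := by
  calc l.length = l.toFinset.card := (List.toFinset_card_of_nodup h).symm
  _ ≤ m.toFinset.card :=
      Finset.card_le_card (fun x hx => List.mem_toFinset.2 (hs (List.mem_toFinset.1 hx)))
  _ ≤ m.length := List.toFinset_card_le m

theorem pyRange_one_nodup (a b : Int) : (PySem.List.pyRange a b 1).Nodup := by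
  generalize hk : (b - a).toNat = k
  induction k generalizing a with
  | zero =>
    have : PySem.List.pyRange a b 1 = [] := by
      apply List.eq_nil_iff_forall_not_mem.2
      intro x hx
      have := PySem.List.mem_pyRange_one.1 hx
      omega
    rw [this]; exact List.nodup_nil
  | succ k ih =>
    have hab : a < b := by omega
    rw [PySem.List.pyRange_one_cons hab]
    refine List.nodup_cons.2 ⟨?_, ih (a+1) (by omega)⟩
    intro hmem
    have := PySem.List.mem_pyRange_one.1 hmem
    omega

-- convenient reading of Pre_
theorem pre_at {ps : List Int} (hP : Pre_solution_1401_4_1 ps) {v : Int}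
    (h1 : 1 ≤ v) (h2 : v < (ps.length : Int)) :
    0 ≤ PySem.List.pyGetD ps v 0 ∧ PySem.List.pyGetD ps v 0 < (ps.length : Int) ∧
      (0 : Int) ∈ chainF ps ps.length v := by
  exact hP.2 v (PySem.List.mem_pyRange_one.2 ⟨h1, h2⟩)

theorem chain_cons {ps : List Int} (hP : Pre_solution_1401_4_1 ps) {v : Int}
    (h1 : 1 ≤ v) (h2 : v < (ps.length : Int)) :
    chainF ps ps.length v =
      PySem.List.pyGetD ps v 0 :: chainF ps ps.length (PySem.List.pyGetD ps v 0) := by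
  obtain ⟨m, hm⟩ : ∃ m, ps.length = m + 1 := ⟨ps.length - 1, by omega⟩
  have hv0 : v ≠ 0 := by omega
  have hchain := (pre_at hP h1 h2).2.2
  have hcons : chainF ps ps.length v =
      PySem.List.pyGetD ps v 0 :: chainF ps m (PySem.List.pyGetD ps v 0) := by
    rw [hm]; exact chainF_succ ps m hv0
  rw [hcons] at hchain ⊢
  rw [List.mem_cons] at hchain
  by_cases hpz : PySem.List.pyGetD ps v 0 = 0
  · rw [hpz, chainF_zero, chainF_zero]
  · have h0m : (0 : Int) ∈ chainF ps m (PySem.List.pyGetD ps v 0) := by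
      rcases hchain with h | h
      · exact absurd h.symm hpz
      · exact h
    rw [chainF_stable_le ps m ps.length _ h0m (by omega)]

theorem chain_mem_facts {ps : List Int} (hP : Pre_solution_1401_4_1 ps) :
    ∀ (k : Nat) (v : Int), 0 ≤ v → v < (ps.length : Int) → dep ps v = k →
      ∀ u ∈ chainF ps ps.length v,
        (0 ≤ u ∧ u < (ps.length : Int)) ∧ dep ps u < dep ps v := by
  intro k
  induction k using Nat.strong_induction_on with
  | _ k ih =>
    intro v h0 h2 hdep u hu
    by_cases hv0 : v = 0
    · rw [hv0, chainF_zero] at hu; cases hu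
    · have h1 : 1 ≤ v := by omega
      have hcons := chain_cons hP h1 h2
      have hdepv : dep ps v = dep ps (PySem.List.pyGetD ps v 0) + 1 := by
        unfold dep; rw [hcons]; simp
      have hpv := pre_at hP h1 h2
      rw [hcons, List.mem_cons] at hu
      rcases hu with hu | hu
      · subst hu
        exact ⟨⟨hpv.1, hpv.2.1⟩, by omega⟩
      · have := ih (dep ps (PySem.List.pyGetD ps v 0)) (by omega)
          (PySem.List.pyGetD ps v 0) hpv.1 hpv.2.1 rfl u hu
        exact ⟨this.1, by omega⟩

theorem chain_nodup {ps : List Int} (hP : Pre_solution_1401_4_1 ps) :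
    ∀ (k : Nat) (v : Int), 0 ≤ v → v < (ps.length : Int) → dep ps v = k →
      (chainF ps ps.length v).Nodup := by
  intro k
  induction k using Nat.strong_induction_on with
  | _ k ih =>
    intro v h0 h2 hdep
    by_cases hv0 : v = 0
    · rw [hv0, chainF_zero]; exact List.nodup_nil
    · have h1 : 1 ≤ v := by omega
      have hcons := chain_cons hP h1 h2
      have hpv := pre_at hP h1 h2
      have hdepv : dep ps v = dep ps (PySem.List.pyGetD ps v 0) + 1 := by
        unfold dep; rw [hcons]; simp
      rw [hcons]
      refine List.nodup_cons.2 ⟨?_, ih (dep ps (PySem.List.pyGetD ps v 0)) (by omega)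
        (PySem.List.pyGetD ps v 0) hpv.1 hpv.2.1 rfl⟩
      intro hmem
      have := chain_mem_facts hP (dep ps (PySem.List.pyGetD ps v 0))
        (PySem.List.pyGetD ps v 0) hpv.1 hpv.2.1 rfl _ hmem
      omega

theorem dep_lt {ps : List Int} (hP : Pre_solution_1401_4_1 ps) {v : Int}
    (h0 : 0 ≤ v) (h2 : v < (ps.length : Int)) : dep ps v < ps.length := by
  have hnodup : (chainF ps ps.length v ++ [v]).Nodup := by
    rw [List.nodup_append]
    refine ⟨chain_nodup hP (dep ps v) v h0 h2 rfl, List.nodup_singleton v, ?_⟩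
    intro u hu b hb heq
    rw [List.mem_singleton] at hb
    have := chain_mem_facts hP (dep ps v) v h0 h2 rfl u hu
    rw [heq, hb] at this
    omega
  have hsub : (chainF ps ps.length v ++ [v]) ⊆ (List.range ps.length).map Int.ofNat := by
    intro u hu
    rw [List.mem_append] at hu
    have huv : 0 ≤ u ∧ u < (ps.length : Int) := by
      rcases hu with hu | hu
      · exact (chain_mem_facts hP (dep ps v) v h0 h2 rfl u hu).1
      · rw [List.mem_singleton] at hu; subst hu; exact ⟨h0, h2⟩
    rw [List.mem_map]
    exact ⟨u.toNat, List.mem_range.2 (by omega), by simpa using Int.toNat_of_nonneg huv.1⟩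
  have := nodup_subset_length hnodup hsub
  simp at this
  unfold dep
  omega

-- facts about a member of childL
theorem child_mem {ps : List Int} (hP : Pre_solution_1401_4_1 ps) {v c : Int}
    (hc : c ∈ childL ps v) :
    1 ≤ c ∧ c < (ps.length : Int) ∧ PySem.List.pyGetD ps c 0 = v := by
  unfold childL at hc
  rw [List.mem_filter] at hc
  have hr := PySem.List.mem_pyRange_one.1 hc.1
  have := of_decide_eq_true hc.2
  exact ⟨hr.1, hr.2, by simpa using hc.2⟩

theorem child_dep {ps : List Int} (hP : Pre_solution_1401_4_1 ps) {v c : Int}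
    (h0 : 0 ≤ v) (h2 : v < (ps.length : Int)) (hc : c ∈ childL ps v) :
    dep ps c = dep ps v + 1 := by
  obtain ⟨hc1, hc2, hcp⟩ := child_mem hP hc
  have := chain_cons hP hc1 hc2
  rw [hcp] at this
  unfold dep
  rw [this]
  simp [dep]

theorem szF_stable_succ {ps : List Int} (hP : Pre_solution_1401_4_1 ps) :
    ∀ (f : Nat) (v : Int), 0 ≤ v → v < (ps.length : Int) → ps.length ≤ f + dep ps v →
      szF ps (f+1) v = szF ps f v := by
  intro f
  induction f with
  | zero =>
    intro v h0 h2 hf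
    have hnil : childL ps v = [] := by
      apply List.eq_nil_iff_forall_not_mem.2
      intro c hc
      obtain ⟨hc1, hc2, _⟩ := child_mem hP hc
      have hd := child_dep hP h0 h2 hc
      have := dep_lt hP (v := c) (by omega) hc2
      omega
    simp [szF, hnil]
  | succ f ih =>
    intro v h0 h2 hf
    show szF ps (f+2) v = szF ps (f+1) v
    simp only [szF]
    congr 1
    congr 1
    apply List.map_congr_left
    intro c hc
    obtain ⟨hc1, hc2, _⟩ := child_mem hP hc
    have hd := child_dep hP h0 h2 hc
    exact ih c (by omega) hc2 (by omega)

theorem szF_stable {ps : List Int} (hP : Pre_solution_1401_4_1 ps) {f : Nat} {v : Int}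
    (h0 : 0 ≤ v) (h2 : v < (ps.length : Int)) (hf : ps.length ≤ f + dep ps v) :
    szF ps f v = SZ ps v := by
  have aux : ∀ g, f ≤ g → szF ps g v = szF ps f v := by
    intro g hg
    induction g, hg using Nat.le_induction with
    | base => rfl
    | succ g hg ih => rw [szF_stable_succ hP g v h0 h2 (by omega), ih]
  have aux2 : ∀ g, ps.length ≤ g → szF ps g v = szF ps ps.length v := by
    intro g hg
    induction g, hg using Nat.le_induction with
    | base => rfl
    | succ g hg ih => rw [szF_stable_succ hP g v h0 h2 (by omega), ih]
  unfold SZ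
  rcases le_total f ps.length with h | h
  · rw [← aux ps.length h]
  · rw [aux2 f h]

theorem SZ_unfold {ps : List Int} (hP : Pre_solution_1401_4_1 ps) {v : Int}
    (h0 : 0 ≤ v) (h2 : v < (ps.length : Int)) :
    SZ ps v = 1 + ((childL ps v).map (SZ ps)).sum := by
  obtain ⟨m, hm⟩ : ∃ m, ps.length = m + 1 := ⟨ps.length - 1, by omega⟩
  have : SZ ps v = szF ps (m+1) v := by unfold SZ; rw [hm]
  rw [this]
  simp only [szF]
  congr 1
  congr 1
  apply List.map_congr_left
  intro c hc
  obtain ⟨hc1, hc2, _⟩ := child_mem hP hc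
  have hd := child_dep hP h0 h2 hc
  exact szF_stable hP (by omega) hc2 (by omega)

-- ----- A side -----
theorem childDictA_getD (ps : List Int) (c : Int) :
    (childDictA ps).getD c [] = childL ps c := by
  have base : ∀ (l : List Int) (d : PySem.Dict Int (List Int)),
      (∀ x, d.getD x [] = []) →
      ∀ x, (l.foldl (fun d i => d.insert i ([] : List Int)) d).getD x [] = [] := by
    intro l
    induction l with
    | nil => intro d h x; exact h x
    | cons a l ih =>
      intro d h x
      simp only [List.foldl_cons]
      apply ih
      intro y
      rw [PySem.Dict.getD_insert]
      split <;> simp [h]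
  have hbase : ∀ x, ((PySem.List.pyRange 0 (ps.length : Int) 1).foldl
      (fun d i => d.insert i ([] : List Int)) PySem.Dict.empty).getD x [] = [] := by
    apply base
    intro x
    simp [PySem.Dict.getD_empty]
  unfold childDictA
  have key := PySem.Dict.getD_foldl_modify_append
    ((PySem.List.pyRange 1 (ps.length : Int) 1).map (fun i => (PySem.List.pyGetD ps i 0, i)))
    ((PySem.List.pyRange 0 (ps.length : Int) 1).foldl
      (fun d i => d.insert i ([] : List Int)) PySem.Dict.empty) c
  rw [List.foldl_map] at key
  simp only [key, hbase, List.nil_append, List.filter_map, List.map_map]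
  unfold childL
  rw [show ((fun (x : Int × Int) => x.2) ∘ fun i => (PySem.List.pyGetD ps i 0, i)) = id from rfl,
    List.map_id]
  apply List.filter_congr
  intro x _
  rfl

theorem dfsA_eq (ps : List Int) :
    ∀ (f : Nat) (v : Int) (nums : PySem.Dict Int Int),
      dfsA (childDictA ps) f v nums =
        (szF ps f v,
         (postPairs ps f v).foldl (fun d p => d.insert p.1 p.2) nums) := by
  intro f
  induction f with
  | zero => intro v nums; rfl
  | succ f ih =>
    intro v nums
    simp only [dfsA]
    rw [childDictA_getD]
    have inner : ∀ (cs : List Int) (a : Int) (d : PySem.Dict Int Int),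
        cs.foldl (fun (acc : Int × PySem.Dict Int Int) i =>
          let s := dfsA (childDictA ps) f i acc.2
          (acc.1 + s.1, s.2)) (a, d) =
        (a + (cs.map (szF ps f)).sum,
         (cs.flatMap (postPairs ps f)).foldl (fun d p => d.insert p.1 p.2) d) := by
      intro cs
      induction cs with
      | nil => intro a d; simp
      | cons c cs ihc =>
        intro a d
        rw [List.foldl_cons]
        dsimp only
        rw [ih, ihc]
        simp [List.flatMap_cons, List.foldl_append, add_assoc]
    rw [inner]
    simp only [postPairs, szF]
    rw [List.foldl_append]
    simp

theorem foldl_insert_getD (pairs : List (Int × Int)) (u w : Int)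
    (h : ∀ p ∈ pairs, p.1 = u → p.2 = w) :
    ∀ (d : PySem.Dict Int Int),
      (pairs.foldl (fun d p => d.insert p.1 p.2) d).getD u 0 =
        if u ∈ pairs.map Prod.fst then w else d.getD u 0 := by
  revert h
  induction pairs with
  | nil => intro h d; simp
  | cons p rest ih =>
    intro h d
    rw [List.foldl_cons, ih (fun q hq hq1 => h q (List.mem_cons_of_mem p hq) hq1)]
    simp only [List.map_cons, List.mem_cons]
    by_cases hmem : u ∈ rest.map Prod.fst
    · simp [hmem]
    · by_cases hp : u = p.1
      · simp [hmem, hp, PySem.Dict.getD_insert,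
          h p (List.mem_cons_self) hp.symm]
      · simp [hmem, hp, PySem.Dict.getD_insert]

theorem postPairs_val {ps : List Int} (hP : Pre_solution_1401_4_1 ps) :
    ∀ (f : Nat) (v : Int), 0 ≤ v → v < (ps.length : Int) → ps.length ≤ f + dep ps v →
      ∀ p ∈ postPairs ps f v, p.2 = SZ ps p.1 := by
  intro f
  induction f with
  | zero => intro v _ _ _ p hp; cases hp
  | succ f ih =>
    intro v h0 h2 hf p hp
    simp only [postPairs, List.mem_append, List.mem_flatMap, List.mem_singleton] at hp
    rcases hp with ⟨c, hc, hpc⟩ | hp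
    · obtain ⟨hc1, hc2, _⟩ := child_mem hP hc
      have hd := child_dep hP h0 h2 hc
      exact ih c (by omega) hc2 (by omega) p hpc
    · subst hp
      exact szF_stable hP h0 h2 (by omega)

theorem mem_chain_parent {ps : List Int} (hP : Pre_solution_1401_4_1 ps) :
    ∀ (k : Nat) (u : Int), 0 ≤ u → u < (ps.length : Int) → dep ps u = k →
      ∀ c ∈ chainF ps ps.length u, 1 ≤ c →
        PySem.List.pyGetD ps c 0 ∈ chainF ps ps.length u := by
  intro k
  induction k using Nat.strong_induction_on with
  | _ k ih =>
    intro u h0 h2 hdep c hc hc1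
    by_cases hu0 : u = 0
    · rw [hu0, chainF_zero] at hc; cases hc
    · have hu1 : 1 ≤ u := by omega
      have hcons := chain_cons hP hu1 h2
      have hpu := pre_at hP hu1 h2
      have hdepu : dep ps u = dep ps (PySem.List.pyGetD ps u 0) + 1 := by
        unfold dep; rw [hcons]; simp
      rw [hcons, List.mem_cons] at hc
      rw [hcons, List.mem_cons]
      rcases hc with hc | hc
      · subst hc
        right
        have hcvalid : PySem.List.pyGetD ps u 0 < (ps.length : Int) := hpu.2.1
        have := chain_cons hP hc1 hcvalid
        rw [this]
        exact List.mem_cons_self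
      · right
        exact ih (dep ps (PySem.List.pyGetD ps u 0)) (by omega)
          (PySem.List.pyGetD ps u 0) hpu.1 hpu.2.1 rfl c hc hc1

theorem postPairs_fst_sub {ps : List Int} (hP : Pre_solution_1401_4_1 ps) :
    ∀ (f : Nat) (v : Int), 0 ≤ v → v < (ps.length : Int) → ps.length ≤ f + dep ps v →
      ∀ u ∈ (postPairs ps f v).map Prod.fst,
        0 ≤ u ∧ u < (ps.length : Int) ∧ (u = v ∨ v ∈ chainF ps ps.length u) := by
  intro f
  induction f with
  | zero => intro v _ _ _ u hu; cases hu
  | succ f ih =>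
    intro v h0 h2 hf u hu
    simp only [postPairs, List.map_append, List.mem_append, List.map_cons, List.map_nil,
      List.mem_singleton, List.mem_map, List.mem_flatMap] at hu
    rcases hu with ⟨p, ⟨c, hc, hpc⟩, hfst⟩ | hu
    · obtain ⟨hc1, hc2, hcp⟩ := child_mem hP hc
      have hd := child_dep hP h0 h2 hc
      have := ih c (by omega) hc2 (by omega) u (List.mem_map.2 ⟨p, hpc, hfst⟩)
      refine ⟨this.1, this.2.1, Or.inr ?_⟩
      rcases this.2.2 with hud | hud
      · subst hud
        have := chain_cons hP hc1 hc2
        rw [hcp] at this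
        rw [this]
        exact List.mem_cons_self
      · have := mem_chain_parent hP (dep ps u) u this.1 this.2.1 rfl c hud hc1
        rw [hcp] at this
        exact this
    · exact ⟨by omega, by omega, Or.inl hu⟩

theorem find_child {ps : List Int} (hP : Pre_solution_1401_4_1 ps) :
    ∀ (k : Nat) (u : Int), 0 ≤ u → u < (ps.length : Int) → dep ps u = k →
      ∀ v ∈ chainF ps ps.length u,
        ∃ c, 1 ≤ c ∧ c < (ps.length : Int) ∧ PySem.List.pyGetD ps c 0 = v ∧
          (c = u ∨ c ∈ chainF ps ps.length u) := by
  intro k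
  induction k using Nat.strong_induction_on with
  | _ k ih =>
    intro u h0 h2 hdep v hv
    by_cases hu0 : u = 0
    · rw [hu0, chainF_zero] at hv; cases hv
    · have hu1 : 1 ≤ u := by omega
      have hcons := chain_cons hP hu1 h2
      have hpu := pre_at hP hu1 h2
      have hdepu : dep ps u = dep ps (PySem.List.pyGetD ps u 0) + 1 := by
        unfold dep; rw [hcons]; simp
      rw [hcons, List.mem_cons] at hv
      rcases hv with hv | hv
      · exact ⟨u, hu1, h2, hv.symm, Or.inl rfl⟩
      · by_cases hpz : PySem.List.pyGetD ps u 0 = 0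
        · rw [hpz, chainF_zero] at hv; cases hv
        · obtain ⟨c, hc1, hc2, hcp, hcm⟩ := ih (dep ps (PySem.List.pyGetD ps u 0)) (by omega)
            (PySem.List.pyGetD ps u 0) hpu.1 hpu.2.1 rfl v hv
          refine ⟨c, hc1, hc2, hcp, Or.inr ?_⟩
          rw [hcons]
          rcases hcm with hcm | hcm
          · rw [hcm]; exact List.mem_cons_self
          · exact List.mem_cons_of_mem _ hcm

theorem postPairs_fst_mem {ps : List Int} (hP : Pre_solution_1401_4_1 ps) :
    ∀ (k : Nat) (u : Int), 0 ≤ u → u < (ps.length : Int) →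
      ∀ (v : Int) (f : Nat), dep ps u - dep ps v = k →
        (u = v ∨ v ∈ chainF ps ps.length u) → ps.length ≤ f + dep ps v →
        u ∈ (postPairs ps f v).map Prod.fst := by
  intro k
  induction k using Nat.strong_induction_on with
  | _ k ih =>
    intro u h0 h2 v f hk hm hf
    rcases hm with hm | hm
    · subst hm
      have hdlt := dep_lt hP h0 h2
      obtain ⟨g, hg⟩ : ∃ g, f = g + 1 := ⟨f - 1, by omega⟩
      subst hg
      simp [postPairs, List.map_append]
    · have hvfacts := chain_mem_facts hP (dep ps u) u h0 h2 rfl v hm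
      obtain ⟨hv0, hv2⟩ := hvfacts.1
      have hvd := hvfacts.2
      have hu1 : 1 ≤ u := by
        by_contra h
        have : u = 0 := by omega
        rw [this, chainF_zero] at hm; cases hm
      obtain ⟨c, hc1, hc2, hcp, hcm⟩ := find_child hP (dep ps u) u h0 h2 rfl v hm
      have hcchild : c ∈ childL ps v := by
        unfold childL
        rw [List.mem_filter]
        exact ⟨PySem.List.mem_pyRange_one.2 ⟨hc1, hc2⟩, by simp [hcp]⟩
      have hdc : dep ps c = dep ps v + 1 := by
        have := chain_cons hP hc1 hc2
        rw [hcp] at this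
        unfold dep; rw [this]; simp [dep]
      have hdcu : dep ps c ≤ dep ps u := by
        rcases hcm with hcm | hcm
        · rw [hcm]
        · exact le_of_lt (chain_mem_facts hP (dep ps u) u h0 h2 rfl c hcm).2
      have hdvn := dep_lt hP hv0 hv2
      obtain ⟨g, hg⟩ : ∃ g, f = g + 1 := ⟨f - 1, by omega⟩
      subst hg
      have hmem : u ∈ (postPairs ps g c).map Prod.fst := by
        refine ih (dep ps u - dep ps c) (by omega) u h0 h2 c g rfl ?_ (by omega)
        rcases hcm with hcm | hcm
        · exact Or.inl hcm.symm
        · exact Or.inr hcm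
      simp only [postPairs, List.map_append, List.mem_append]
      left
      rw [List.mem_map] at hmem ⊢
      obtain ⟨p, hp, hfst⟩ := hmem
      exact ⟨p, List.mem_flatMap.2 ⟨c, hcchild, hp⟩, hfst⟩

theorem numsA_getD {ps : List Int} (hP : Pre_solution_1401_4_1 ps) {u : Int}
    (h0 : 0 ≤ u) (h2 : u < (ps.length : Int)) :
    (numsA ps).getD u 0 = SZ ps u := by
  have hn0 : (0:Int) < (ps.length : Int) := by exact_mod_cast hP.1
  have hdep0 : dep ps 0 = 0 := by unfold dep; rw [chainF_zero]; rfl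
  unfold numsA
  rw [dfsA_eq]
  have hval := postPairs_val hP ps.length 0 (le_refl _) hn0 (by omega)
  rw [foldl_insert_getD _ u (SZ ps u)
    (fun p hp hpu => by rw [hval p hp, hpu]) PySem.Dict.empty]
  have hmem : u ∈ (postPairs ps ps.length 0).map Prod.fst := by
    apply postPairs_fst_mem hP (dep ps u - dep ps 0) u h0 h2 0 ps.length rfl _ (by omega)
    by_cases hu0 : u = 0
    · exact Or.inl hu0
    · exact Or.inr (pre_at hP (by omega) h2).2.2
  rw [if_pos hmem]

theorem numsA_size {ps : List Int} (hP : Pre_solution_1401_4_1 ps) :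
    (numsA ps).size = ps.length := by
  have hn0 : (0:Int) < (ps.length : Int) := by exact_mod_cast hP.1
  have hdep0 : dep ps 0 = 0 := by unfold dep; rw [chainF_zero]; rfl
  have hsize : (numsA ps).size = (numsA ps).keys.length := by
    simp [PySem.Dict.size, PySem.Dict.keys]
  have hkeys : (numsA ps).keys =
      PySem.Set.ofList ((postPairs ps ps.length 0).map Prod.fst) := by
    unfold numsA
    rw [dfsA_eq]
    rw [PySem.Dict.keys_foldl_insert_key _ Prod.fst (fun _ p => p.2) PySem.Dict.empty]
    rw [PySem.Dict.keys_empty, PySem.Set.ofList_eq_foldl]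
    rfl
  have hperm : (PySem.Set.ofList ((postPairs ps ps.length 0).map Prod.fst)).Perm
      ((List.range ps.length).map (fun m : Nat => (m : Int))) := by
    rw [List.perm_ext_iff_of_nodup (PySem.Set.nodup_ofList _)
      (List.nodup_range.map (f := (fun m : Nat => (m : Int))) (fun a b h => by simpa using h))]
    intro x
    rw [PySem.Set.mem_ofList]
    constructor
    · intro hx
      have := postPairs_fst_sub hP ps.length 0 (le_refl _) hn0 (by omega) x hx
      exact List.mem_map.2
        ⟨x.toNat, List.mem_range.2 (by omega), by simpa using Int.toNat_of_nonneg this.1⟩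
    · intro hx
      obtain ⟨m, hm, hxm⟩ := List.mem_map.1 hx
      rw [List.mem_range] at hm
      subst hxm
      apply postPairs_fst_mem hP (dep ps (m : Int) - dep ps 0) (m : Int)
        (by omega) (by omega) 0 ps.length rfl _ (by omega)
      by_cases hu0 : (m : Int) = 0
      · exact Or.inl hu0
      · exact Or.inr (pre_at hP (by omega) (by omega)).2.2
  rw [hsize, hkeys, hperm.length_eq]
  simp

-- ----- B side -----
theorem walkDepth_eq (ps : List Int) :
    ∀ (f : Nat) (v a : Int), (v = 0 ∨ (0:Int) ∈ chainF ps f v) →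
      walkDepth ps f v a = a + ((chainF ps f v).length : Int) := by
  intro f
  induction f with
  | zero =>
    intro v a h
    rcases h with h | h
    · simp [walkDepth, chainF, h]
    · cases h
  | succ f ih =>
    intro v a h
    by_cases hv : v = 0
    · simp [walkDepth, hv, chainF_zero]
    · rw [chainF_succ ps f hv] at h ⊢
      have h' : PySem.List.pyGetD ps v 0 = 0 ∨
          (0:Int) ∈ chainF ps f (PySem.List.pyGetD ps v 0) := by
        rcases h with h | h
        · exact absurd h hv
        · rw [List.mem_cons] at h
          rcases h with h | h
          · exact Or.inl h.symm
          · exact Or.inr h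
      have : walkDepth ps (f+1) v a = walkDepth ps f (PySem.List.pyGetD ps v 0) (a+1) := by
        simp [walkDepth, hv]
      rw [this, ih _ _ h']
      rw [List.length_cons]
      push_cast
      ring

-- a fold of element updates leaves every position it never writes unchanged
theorem foldl_set_untouched (idx : Int → Int) (valf : List Int → Int → Int) :
    ∀ (l : List Int) (ds : List Int) (i : Nat), (∀ x ∈ l, (idx x).toNat ≠ i) →
      (l.foldl (fun a x => a.set (idx x).toNat (valf a x)) ds).getD i 0 = ds.getD i 0 := by
  intro l
  induction l with
  | nil => intro ds i _; rfl
  | cons x l ih =>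
    intro ds i h
    rw [List.foldl_cons, ih _ _ (fun y hy => h y (List.mem_cons_of_mem x hy)),
      List.getD_eq_getElem?_getD, List.getElem?_set_ne (h x List.mem_cons_self),
      ← List.getD_eq_getElem?_getD]

theorem foldl_set_getD (g : Int → Int) (l : List Int) (hnd : l.Nodup) :
    ∀ (ds : List Int), (∀ j ∈ l, 0 ≤ j ∧ j.toNat < ds.length) →
      ∀ u ∈ l, (l.foldl (fun ds j => ds.set j.toNat (g j)) ds).getD u.toNat 0 = g u := by
  induction l with
  | nil => intro ds _ u hu; cases hu
  | cons j l ih =>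
    intro ds hb u hu
    rw [List.foldl_cons]
    rcases List.mem_cons.1 hu with hu | hu
    · subst hu
      have hne : ∀ x ∈ l, x.toNat ≠ u.toNat := by
        intro x hx
        have hxl := hb x (List.mem_cons_of_mem u hx)
        have hul := hb u List.mem_cons_self
        rcases List.nodup_cons.1 hnd with ⟨hnotin, _⟩
        intro hcon
        have : x = u := by omega
        exact hnotin (this ▸ hx)
      have := foldl_set_untouched (fun x => x) (fun _ x => g x) l
        (ds.set u.toNat (g u)) u.toNat hne
      simp only at this
      rw [this, List.getD_eq_getElem?_getD]
      have hlen : u.toNat < ds.length := by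
        have := hb u List.mem_cons_self
        omega
      rw [List.getElem?_set_self hlen]
      rfl
    · exact ih (List.nodup_cons.1 hnd).2 (ds.set j.toNat (g j))
        (fun y hy => by
          have := hb y (List.mem_cons_of_mem j hy)
          simp only [List.length_set]
          omega) u hu

theorem depthsB_getD {ps : List Int} (hP : Pre_solution_1401_4_1 ps) {j : Int}
    (h1 : 1 ≤ j) (h2 : j < (ps.length : Int)) :
    PySem.List.pyGetD (depthsB ps) j 0 = (dep ps j : Int) := by
  unfold depthsB
  rw [PySem.List.pyGetD_of_nonneg _ _ (by omega)]
  rw [foldl_set_getD _ _ (pyRange_one_nodup _ _) _ ?bounds j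
    (PySem.List.mem_pyRange_one.2 ⟨h1, h2⟩)]
  case bounds =>
    intro x hx
    have := PySem.List.mem_pyRange_one.1 hx
    rw [List.length_replicate]
    omega
  rw [walkDepth_eq ps ps.length j 0 (Or.inr (pre_at hP h1 h2).2.2)]
  unfold dep
  simp

theorem orderB_perm (ps : List Int) :
    (orderB ps).Perm (PySem.List.pyRange 1 (ps.length : Int) 1) := by
  exact PySem.List.sorted_perm _ _ _

theorem orderB_mem {ps : List Int} {j : Int} (h : j ∈ orderB ps) :
    1 ≤ j ∧ j < (ps.length : Int) := by
  exact PySem.List.mem_pyRange_one.1 ((orderB_perm ps).mem_iff.1 h)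

theorem orderB_sorted {ps : List Int} (hP : Pre_solution_1401_4_1 ps) :
    (orderB ps).Pairwise (fun a b => dep ps b ≤ dep ps a) := by
  have hp := PySem.List.sorted_pairwise (PySem.List.pyRange 1 (ps.length : Int) 1)
    (fun j => -(PySem.List.pyGetD (depthsB ps) j 0))
  have : orderB ps = PySem.List.sorted (PySem.List.pyRange 1 (ps.length : Int) 1)
      (fun j => -(PySem.List.pyGetD (depthsB ps) j 0)) := rfl
  rw [← this] at hp
  refine List.Pairwise.imp_of_mem ?_ hp
  intro a b ha hb hab
  obtain ⟨ha1, ha2⟩ := orderB_mem ha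
  obtain ⟨hb1, hb2⟩ := orderB_mem hb
  rw [depthsB_getD hP ha1 ha2, depthsB_getD hP hb1 hb2] at hab
  omega

theorem pySet_of_nonneg (xs : List Int) (i v : Int) (h : 0 ≤ i) :
    pySet xs i v = xs.set i.toNat v := by
  unfold pySet
  rw [if_pos h]

theorem filter_perm_childL {ps : List Int} (hP : Pre_solution_1401_4_1 ps) {v : Int}
    (l : List Int) (hnd : l.Nodup)
    (hmem : ∀ c ∈ l, 1 ≤ c ∧ c < (ps.length : Int))
    (hsub : ∀ c ∈ childL ps v, c ∈ l) :
    (l.filter (fun c => PySem.List.pyGetD ps c 0 == v)).Perm (childL ps v) := by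
  unfold childL at hsub ⊢
  rw [List.perm_ext_iff_of_nodup (hnd.filter _)
    ((pyRange_one_nodup 1 (ps.length : Int)).filter _)]
  intro c
  rw [List.mem_filter, List.mem_filter]
  constructor
  · rintro ⟨hc, hbq⟩
    exact ⟨PySem.List.mem_pyRange_one.2 ⟨(hmem c hc).1, (hmem c hc).2⟩, hbq⟩
  · rintro ⟨hc, hbq⟩
    exact ⟨hsub c (List.mem_filter.2 ⟨hc, hbq⟩), hbq⟩

-- the central invariant of B's deepest-first sweep
theorem sizesB_fold {ps : List Int} (hP : Pre_solution_1401_4_1 ps) :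
    ∀ (todo done sz : List Int), orderB ps = done ++ todo → sz.length = ps.length →
      (∀ v, 0 ≤ v → v < (ps.length : Int) →
        PySem.List.pyGetD sz v 0 =
          1 + ((done.filter (fun j => PySem.List.pyGetD ps j 0 == v)).map (SZ ps)).sum) →
      ∀ v, 0 ≤ v → v < (ps.length : Int) →
        PySem.List.pyGetD
          (todo.foldl (fun sz j =>
            pySet sz (PySem.List.pyGetD ps j 0)
              (PySem.List.pyGetD sz (PySem.List.pyGetD ps j 0) 0 +
               PySem.List.pyGetD sz j 0)) sz) v 0 =
          1 + (((orderB ps).filter (fun j => PySem.List.pyGetD ps j 0 == v)).map (SZ ps)).sum := by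
  intro todo
  induction todo with
  | nil =>
    intro done sz horder hlen hinv v h0 h2
    rw [List.append_nil] at horder
    rw [List.foldl_nil, hinv v h0 h2, ← horder]
  | cons j rest ih =>
    intro done sz horder hlen hinv v h0 h2
    have hordnd : (orderB ps).Nodup :=
      ((orderB_perm ps).nodup_iff).2 (pyRange_one_nodup 1 (ps.length : Int))
    have hjmem : j ∈ orderB ps := by rw [horder]; simp
    obtain ⟨hj1, hj2⟩ := orderB_mem hjmem
    have hpj := pre_at hP hj1 hj2
    have hdnd : done.Nodup := by
      have : done.Sublist (orderB ps) := by
        rw [horder]; exact List.sublist_append_left done (j :: rest)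
      exact hordnd.sublist this
    have hdmem : ∀ c ∈ done, 1 ≤ c ∧ c < (ps.length : Int) := by
      intro c hc
      exact orderB_mem (by rw [horder]; exact List.mem_append_left _ hc)
    have hsub : ∀ c ∈ childL ps j, c ∈ done := by
      intro c hc
      obtain ⟨hc1, hc2, hcp⟩ := child_mem hP hc
      have hdc := child_dep hP (by omega) hj2 hc
      have hco : c ∈ orderB ps :=
        (orderB_perm ps).mem_iff.2 (PySem.List.mem_pyRange_one.2 ⟨hc1, hc2⟩)
      rw [horder, List.mem_append, List.mem_cons] at hco
      rcases hco with hco | hco | hco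
      · exact hco
      · exfalso; rw [hco] at hdc; omega
      · exfalso
        have hpw := orderB_sorted hP
        rw [horder] at hpw
        have := (List.pairwise_cons.1 (List.pairwise_append.1 hpw).2.1).1 c hco
        omega
    have hjval : PySem.List.pyGetD sz j 0 = SZ ps j := by
      rw [hinv j (by omega) hj2, SZ_unfold hP (by omega) hj2]
      have hpm := filter_perm_childL hP done hdnd hdmem hsub
      rw [(hpm.map (SZ ps)).sum_eq]
    rw [List.foldl_cons, pySet_of_nonneg _ _ _ hpj.1]
    refine ih (done ++ [j]) _ ?_ ?_ ?_ v h0 h2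
    · rw [horder, List.append_assoc]; rfl
    · rw [List.length_set]; exact hlen
    · intro w hw0 hw2
      have hpj0 : 0 ≤ PySem.List.pyGetD ps j 0 := hpj.1
      have hpjlen : (PySem.List.pyGetD ps j 0).toNat < sz.length := by
        have := hpj.2.1; omega
      rw [PySem.List.pyGetD_of_nonneg _ _ hw0, List.getD_eq_getElem?_getD]
      by_cases hveq : w = PySem.List.pyGetD ps j 0
      · rw [hveq, List.getElem?_set_self hpjlen]
        simp only [Option.getD_some]
        rw [List.filter_append, List.map_append, List.sum_append]
        have hjfil : [j].filter
            (fun c => PySem.List.pyGetD ps c 0 == PySem.List.pyGetD ps j 0) = [j] := by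
          simp
        rw [hjfil, hjval, hinv (PySem.List.pyGetD ps j 0) hpj0 hpj.2.1]
        simp only [List.map_cons, List.map_nil, List.sum_cons, List.sum_nil]
        omega
      · have hne : (PySem.List.pyGetD ps j 0).toNat ≠ w.toNat := by omega
        rw [List.getElem?_set_ne hne, ← List.getD_eq_getElem?_getD,
          ← PySem.List.pyGetD_of_nonneg _ _ hw0, hinv w hw0 hw2]
        rw [List.filter_append, List.map_append, List.sum_append]
        have hjfil : [j].filter (fun c => PySem.List.pyGetD ps c 0 == w) = [] := by
          simp
          omega
        rw [hjfil]
        simp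

theorem sizesB_getD {ps : List Int} (hP : Pre_solution_1401_4_1 ps) {v : Int}
    (h0 : 0 ≤ v) (h2 : v < (ps.length : Int)) :
    PySem.List.pyGetD (sizesB ps) v 0 = SZ ps v := by
  unfold sizesB
  rw [sizesB_fold hP (orderB ps) [] (List.replicate ps.length 1) (by simp)
    (List.length_replicate) ?base v h0 h2]
  case base =>
    intro w hw0 hw2
    rw [PySem.List.pyGetD_of_nonneg _ _ hw0, List.getD_eq_getElem?_getD,
      List.getElem?_replicate]
    simp only [List.filter_nil, List.map_nil, List.sum_nil]
    rw [if_pos (by omega)]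
    rfl
  rw [SZ_unfold hP h0 h2]
  have hpm := filter_perm_childL hP (v := v) (orderB ps)
    ((orderB_perm ps).nodup_iff.2 (pyRange_one_nodup 1 (ps.length : Int)))
    (fun c hc => orderB_mem hc)
    (fun c hc => by
      obtain ⟨hc1, hc2, _⟩ := child_mem hP hc
      exact (orderB_perm ps).mem_iff.2 (PySem.List.mem_pyRange_one.2 ⟨hc1, hc2⟩))
  rw [(hpm.map (SZ ps)).sum_eq]

theorem foldl_set_comb (ps : List Int) (comb : Int → Int → Int) (val : Int → Int) :
    ∀ (l arr : List Int),
      (∀ j ∈ l, 0 ≤ PySem.List.pyGetD ps j 0 ∧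
        PySem.List.pyGetD ps j 0 < (arr.length : Int)) →
      ∀ v, 0 ≤ v → v < (arr.length : Int) →
        PySem.List.pyGetD
          (l.foldl (fun a j =>
            pySet a (PySem.List.pyGetD ps j 0)
              (comb (PySem.List.pyGetD a (PySem.List.pyGetD ps j 0) 0) (val j))) arr) v 0 =
          ((l.filter (fun j => PySem.List.pyGetD ps j 0 == v)).map val).foldl comb
            (PySem.List.pyGetD arr v 0) := by
  intro l
  induction l with
  | nil => intro arr _ v _ _; rfl
  | cons j rest ih =>
    intro arr hb v h0 h2
    have hpj := hb j List.mem_cons_self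
    have hpjlen : (PySem.List.pyGetD ps j 0).toNat < arr.length := by omega
    rw [List.foldl_cons, pySet_of_nonneg _ _ _ hpj.1]
    rw [ih _ (fun y hy => by
      have := hb y (List.mem_cons_of_mem j hy)
      simp only [List.length_set]
      exact this) v h0 (by rw [List.length_set]; exact h2)]
    by_cases hveq : PySem.List.pyGetD ps j 0 = v
    · have hfil : (j :: rest).filter (fun c => PySem.List.pyGetD ps c 0 == v) =
          j :: rest.filter (fun c => PySem.List.pyGetD ps c 0 == v) := by
        simp [List.filter_cons, hveq]
      rw [hfil, List.map_cons, List.foldl_cons]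
      congr 1
      rw [PySem.List.pyGetD_of_nonneg _ _ h0, List.getD_eq_getElem?_getD, ← hveq,
        List.getElem?_set_self hpjlen]
      rw [PySem.List.pyGetD_of_nonneg _ _ hpj.1, List.getD_eq_getElem?_getD]
      rfl
    · have hfil : (j :: rest).filter (fun c => PySem.List.pyGetD ps c 0 == v) =
          rest.filter (fun c => PySem.List.pyGetD ps c 0 == v) := by
        simp [List.filter_cons]
        omega
      rw [hfil]
      congr 1
      rw [PySem.List.pyGetD_of_nonneg _ _ h0, PySem.List.pyGetD_of_nonneg _ _ h0,
        List.getD_eq_getElem?_getD, List.getD_eq_getElem?_getD,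
        List.getElem?_set_ne (by omega)]

theorem prodsB_getD {ps : List Int} (hP : Pre_solution_1401_4_1 ps) {v : Int}
    (h0 : 0 ≤ v) (h2 : v < (ps.length : Int)) :
    PySem.List.pyGetD (prodsB ps) v 0 = ((childL ps v).map (SZ ps)).foldl (· * ·) 1 := by
  unfold prodsB
  rw [foldl_set_comb ps (· * ·) (fun j => PySem.List.pyGetD (sizesB ps) j 0)
    (PySem.List.pyRange 1 (ps.length : Int) 1) (List.replicate ps.length 1)
    (fun j hj => by
      obtain ⟨hj1, hj2⟩ := PySem.List.mem_pyRange_one.1 hj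
      have := pre_at hP hj1 hj2
      rw [List.length_replicate]
      exact ⟨this.1, this.2.1⟩) v h0 (by rw [List.length_replicate]; exact h2)]
  have hrep : PySem.List.pyGetD (List.replicate ps.length (1 : Int)) v 0 = 1 := by
    rw [PySem.List.pyGetD_of_nonneg _ _ h0, List.getD_eq_getElem?_getD,
      List.getElem?_replicate, if_pos (by omega)]
    rfl
  have hfil : (PySem.List.pyRange 1 (ps.length : Int) 1).filter
      (fun j => PySem.List.pyGetD ps j 0 == v) = childL ps v := rfl
  have hlist : ((PySem.List.pyRange 1 (ps.length : Int) 1).filter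
      (fun j => PySem.List.pyGetD ps j 0 == v)).map
        (fun j => PySem.List.pyGetD (sizesB ps) j 0) = (childL ps v).map (SZ ps) := by
    rw [hfil]
    apply List.map_congr_left
    intro c hc
    obtain ⟨hc1, hc2, _⟩ := child_mem hP hc
    exact sizesB_getD hP (by omega) hc2
  exact congrArg₂ (fun (i : Int) (l : List Int) => List.foldl (· * ·) i l) hrep hlist

-- ----- assembling -----
theorem foldl_mul_shift (f : Int → Int) :
    ∀ (l : List Int) (a b : Int),
      l.foldl (fun k x => k * f x) (a * b) = a * l.foldl (fun k x => k * f x) b := by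
  intro l
  induction l with
  | nil => intro a b; rfl
  | cons x l ih =>
    intro a b
    rw [List.foldl_cons, List.foldl_cons, mul_assoc, ih]

theorem score_eq {ps : List Int} (hP : Pre_solution_1401_4_1 ps) : scoreA ps = scoreB ps := by
  have hn0 : (0:Int) < (ps.length : Int) := by exact_mod_cast hP.1
  unfold scoreA scoreB
  rw [numsA_size hP]
  simp only [childDictA_getD]
  rw [PySem.List.foldl_append_singleton_eq_map, PySem.List.foldl_append_singleton_eq_map]
  congr 1
  · congr 1
    rw [PySem.List.foldl_congr_mem' (childL ps 0) _ (fun k j => k * SZ ps j) 1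
      (fun x hx acc => by
        obtain ⟨hx1, hx2, _⟩ := child_mem hP hx
        rw [numsA_getD hP (by omega) hx2])]
    rw [prodsB_getD hP (le_refl 0) hn0, List.foldl_map]
  · apply List.map_congr_left
    intro i hi
    obtain ⟨hi1, hi2⟩ := PySem.List.mem_pyRange_one.1 hi
    rw [PySem.List.foldl_congr_mem' (childL ps i) _ (fun k j => k * SZ ps j) _
      (fun x hx acc => by
        obtain ⟨hx1, hx2, _⟩ := child_mem hP hx
        rw [numsA_getD hP (by omega) hx2])]
    rw [numsA_getD hP (le_refl 0) hn0, numsA_getD hP (by omega : (0:Int) ≤ i) hi2]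
    rw [sizesB_getD hP (le_refl 0) hn0, sizesB_getD hP (by omega : (0:Int) ≤ i) hi2,
      prodsB_getD hP (by omega : (0:Int) ≤ i) hi2]
    rw [List.foldl_map]
    rw [show (1 : Int) * (SZ ps 0 - SZ ps i) = (SZ ps 0 - SZ ps i) * 1 from by ring]
    exact foldl_mul_shift (SZ ps) (childL ps i) _ 1

-- ===== VERDICT (by name: the statement is the Claim_ definition above) =====
theorem solution_1401_4_1_spec : Claim_equal_solution_1401_4_1 := by
  intro parents _hDom hPre
  unfold Spec_solution_1401_4_1 solution_1401_4_1 solution_1401_4_1_alt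
  rw [score_eq hPre]
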